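-- pv_equiv track=rewrite | github.com/zai-org/SCAIL-Pose | DWPoseProcess/extractUtils.py | check_single_human_requirements
-- ===== SOURCE A (Python) =====
-- def get_bbox_area(bbox):
--     x1, y1, x2, y2 = bbox
--     return (x2 - x1) * (y2 - y1)
--
-- def check_single_human_requirements(det_result):
--     # filter results
--     if len(det_result) > 3 or len(det_result) == 0:
--         return False
--     elif len(det_result) == 1:
--         return True
--     elif len(det_result) > 1: # [2, 3]
--         bbox_areas = [get_bbox_area(bbox) for bbox in det_result]
--         # 获取最大 bbox 面积的索引
--         max_ind = max(range(len(bbox_areas)), key=lambda i: bbox_areas[i])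
--         # 获取次大面积（需要排除 max_ind）
--         other_indices = [i for i in range(len(bbox_areas)) if i != max_ind]
--         second_max_area = max([bbox_areas[i] for i in other_indices])
--
--         max_area = bbox_areas[max_ind]
--         if max_area < 2 * second_max_area:
--             return False
--         else:
--             return True
-- ===== SOURCE B (Python) =====
-- def check_single_human_requirements(det_result):
--     n = len(det_result)
--     if n > 3 or n == 0:
--         return False
--     if n == 1:
--         return True
--     areas = sorted(((x2 - x1) * (y2 - y1) for x1, y1, x2, y2 in det_result), reverse=True)
--     return not (areas[0] < 2 * areas[1])
-- ===== Notes on version B (the rewrite author's own statement) =====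
-- stated objective: simpler
-- what changed: Replaces the argmax-index / exclude-index / second-max two-pass scan with one descending sort of the areas followed by a fixed top-two comparison.
import Mathlib
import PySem

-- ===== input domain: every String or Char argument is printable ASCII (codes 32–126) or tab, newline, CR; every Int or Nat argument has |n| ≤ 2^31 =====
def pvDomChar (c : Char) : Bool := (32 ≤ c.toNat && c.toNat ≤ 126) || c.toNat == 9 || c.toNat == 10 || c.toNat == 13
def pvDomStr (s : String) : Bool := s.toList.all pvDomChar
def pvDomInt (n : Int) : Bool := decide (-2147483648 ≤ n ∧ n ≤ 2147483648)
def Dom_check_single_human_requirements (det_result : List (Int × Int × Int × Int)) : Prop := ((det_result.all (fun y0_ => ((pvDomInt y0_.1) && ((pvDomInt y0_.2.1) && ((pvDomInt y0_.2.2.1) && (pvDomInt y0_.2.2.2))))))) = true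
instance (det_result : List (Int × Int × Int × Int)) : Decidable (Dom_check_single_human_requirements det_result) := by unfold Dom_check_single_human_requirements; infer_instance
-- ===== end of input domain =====

-- B replaces A's argmax-index/second-max two-pass scan with a descending sort and a top-two comparison (objective: simpler).
-- ===== PORT A =====
def getBboxArea (bbox : Int × Int × Int × Int) : Int :=
  match bbox with
  | (x1, y1, x2, y2) => (x2 - x1) * (y2 - y1)

def check_single_human_requirements (det_result : List (Int × Int × Int × Int)) : Bool :=
  if det_result.length > 3 || det_result.length == 0 then false
  else if det_result.length == 1 then true
  else if det_result.length > 1 then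
    let bbox_areas := det_result.map getBboxArea
    -- max(range(len), key=...) : first index with maximal key; nonempty here (length ≥ 2), so .getD 0 is never used
    let max_ind := (PySem.List.max? (PySem.List.pyRange 0 (bbox_areas.length : Int) 1)
        (fun i => PySem.List.pyGetD bbox_areas i 0)).getD 0
    let other_indices := (PySem.List.pyRange 0 (bbox_areas.length : Int) 1).filter (fun i => i != max_ind)
    -- max([...]) : list nonempty here (length ≥ 2), so .getD 0 is never used
    let second_max_area := (PySem.List.max? (other_indices.map (fun i => PySem.List.pyGetD bbox_areas i 0))
        (fun a => a)).getD 0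
    let max_area := PySem.List.pyGetD bbox_areas max_ind 0
    if max_area < 2 * second_max_area then false else true
  else false

-- ===== PORT B =====
def check_single_human_requirements_alt (det_result : List (Int × Int × Int × Int)) : Bool :=
  let n := det_result.length
  if n > 3 || n == 0 then false
  else if n == 1 then true
  else
    let areas := PySem.List.sorted
      (det_result.map (fun b => match b with | (x1, y1, x2, y2) => (x2 - x1) * (y2 - y1)))
      (fun a => a) true
    -- areas[0], areas[1]: in range since n ∈ {2,3}
    !(PySem.List.pyGetD areas 0 0 < 2 * PySem.List.pyGetD areas 1 0)

-- ===== PRECONDITION & SPEC =====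
def Spec_check_single_human_requirements (det_result : List (Int × Int × Int × Int)) (out : Bool) : Prop := out = check_single_human_requirements_alt det_result
instance (det_result : List (Int × Int × Int × Int)) (out : Bool) : Decidable (Spec_check_single_human_requirements det_result out) := by unfold Spec_check_single_human_requirements; infer_instance

-- ===== CLAIM (what is proved, stated in full; the proofs are below) =====
def Claim_equal_check_single_human_requirements : Prop := ∀ (det_result : List (Int × Int × Int × Int)), Dom_check_single_human_requirements det_result → Spec_check_single_human_requirements det_result (check_single_human_requirements det_result)

-- ===== LEMMAS AND PROOFS =====
lemma area_lambda :
    (fun b : Int × Int × Int × Int => match b with | (x1, y1, x2, y2) => (x2 - x1) * (y2 - y1))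
      = getBboxArea := rfl

set_option maxHeartbeats 1600000 in
lemma eq_two (p q : Int × Int × Int × Int) :
    check_single_human_requirements [p, q] = check_single_human_requirements_alt [p, q] := by
  rcases lt_trichotomy (getBboxArea p) (getBboxArea q) with h1 | h1 | h1 <;>
    simp [check_single_human_requirements, check_single_human_requirements_alt, area_lambda,
      PySem.List.max?, PySem.List.pyRange, PySem.List.pyGetD, PySem.List.pyIdx?,
      PySem.List.sorted, PySem.List.insertBy, PySem.List.pyGet?, List.range_succ, h1] <;>
    split_ifs <;>
    simp_all [PySem.List.max?, PySem.List.pyRange, PySem.List.pyGetD, PySem.List.pyIdx?,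
      PySem.List.sorted, PySem.List.insertBy, PySem.List.pyGet?, List.range_succ] <;>
    split_ifs <;>
    simp_all [PySem.List.max?, PySem.List.pyRange, PySem.List.pyGetD, PySem.List.pyIdx?,
      PySem.List.sorted, PySem.List.insertBy, PySem.List.pyGet?, List.range_succ] <;>
    (try split_ifs) <;>
    (try simp_all [PySem.List.max?, PySem.List.pyRange, PySem.List.pyGetD, PySem.List.pyIdx?,
      PySem.List.sorted, PySem.List.insertBy, PySem.List.pyGet?, List.range_succ, Option.getD]) <;>
    omega

set_option maxHeartbeats 16000000 in
lemma eq_three (p q r : Int × Int × Int × Int) :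
    check_single_human_requirements [p, q, r] = check_single_human_requirements_alt [p, q, r] := by
  rcases lt_trichotomy (getBboxArea p) (getBboxArea q) with h1 | h1 | h1 <;>
  rcases lt_trichotomy (getBboxArea p) (getBboxArea r) with h2 | h2 | h2 <;>
  rcases lt_trichotomy (getBboxArea q) (getBboxArea r) with h3 | h3 | h3 <;>
    simp [check_single_human_requirements, check_single_human_requirements_alt, area_lambda,
      PySem.List.max?, PySem.List.pyRange, PySem.List.pyGetD, PySem.List.pyIdx?,
      PySem.List.sorted, PySem.List.insertBy, PySem.List.pyGet?, List.range_succ,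
      h1, h2, h3] <;>
    split_ifs <;>
    simp_all [PySem.List.max?, PySem.List.pyRange, PySem.List.pyGetD, PySem.List.pyIdx?,
      PySem.List.sorted, PySem.List.insertBy, PySem.List.pyGet?, List.range_succ] <;>
    split_ifs <;>
    simp_all [PySem.List.max?, PySem.List.pyRange, PySem.List.pyGetD, PySem.List.pyIdx?,
      PySem.List.sorted, PySem.List.insertBy, PySem.List.pyGet?, List.range_succ] <;>
    (try split_ifs) <;>
    (try simp_all [PySem.List.max?, PySem.List.pyRange, PySem.List.pyGetD, PySem.List.pyIdx?,
      PySem.List.sorted, PySem.List.insertBy, PySem.List.pyGet?, List.range_succ, Option.getD]) <;>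
    omega

-- ===== VERDICT (by name: the statement is the Claim_ definition above) =====
theorem check_single_human_requirements_spec : Claim_equal_check_single_human_requirements := by
  intro det_result _
  unfold Spec_check_single_human_requirements
  match det_result with
  | [] => decide
  | [p] => rfl
  | [p, q] => exact eq_two p q
  | [p, q, r] => exact eq_three p q r
  | p :: q :: r :: s :: t =>
      simp [check_single_human_requirements, check_single_human_requirements_alt,
        List.length_cons]
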